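-- pv_equiv track=rewrite | github.com/shivaAcharya/LeetCode | 1461-check-if-a-string-contains-all-binary-codes-of-size-k/1461-check-if-a-string-contains-all-binary-codes-of-size-k.py | hasAllCodes
-- ===== SOURCE A (Python) =====
-- def hasAllCodes(s: str, k: int) -> bool:
--     need = 1 << k # 2^k
--     got = set()
--
--     for i in range(k, len(s) + 1):
--         temp = s[i-k:i]
--
--         if temp not in got:
--             got.add(temp)
--             need -= 1
--             if need == 0:
--                 return True
--
--     return False
-- ===== SOURCE B (Python) =====
-- def hasAllCodes(s: str, k: int) -> bool:
--     # Sort-then-scan: sort all length-k windows so equal windows become adjacent,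
--     # then count runs with a single previous-element scan; no hash set at all.
--     windows = sorted(s[i:i + k] for i in range(len(s) - k + 1))
--     distinct = 0
--     prev = None
--     for w in windows:
--         if w != prev:
--             distinct += 1
--             prev = w
--     return distinct >= (1 << k)
-- ===== Notes on version B (the rewrite author's own statement) =====
-- stated objective: alternative
-- what changed: B replaces A's hash-set membership test and decrementing 'need' counter by a sort-then-scan: it sorts the list of length-k windows so duplicates become adjacent and counts runs with one previous-element pass, comparing the run count to 2^k once.
import Mathlib
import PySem

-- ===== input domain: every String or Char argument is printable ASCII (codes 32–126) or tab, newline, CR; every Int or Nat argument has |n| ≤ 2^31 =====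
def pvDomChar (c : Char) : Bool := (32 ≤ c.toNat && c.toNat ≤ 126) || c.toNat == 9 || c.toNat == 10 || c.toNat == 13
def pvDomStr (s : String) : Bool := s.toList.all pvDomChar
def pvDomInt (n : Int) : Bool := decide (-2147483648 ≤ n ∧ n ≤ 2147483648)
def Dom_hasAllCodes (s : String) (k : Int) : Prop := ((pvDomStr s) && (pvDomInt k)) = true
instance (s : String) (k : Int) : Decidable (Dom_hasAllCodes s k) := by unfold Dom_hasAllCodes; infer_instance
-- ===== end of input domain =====

-- B sorts the length-k windows so duplicates become adjacent and counts runs with one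
-- previous-element scan (no hash set, no counter); objective: alternative.

-- ===== PORT A =====
-- the for-loop of A: state (got, need), early return True when need hits 0
def pvALoop (s : List Char) (k : Int) : List Int → PySem.Set (List Char) → Int → Bool
  | [], _, _ => false
  | i :: rest, got, need =>
    let temp := PySem.List.slice s (some (i - k)) (some i)   -- s[i-k:i]
    if PySem.Set.contains got temp then
      pvALoop s k rest got need
    else
      let need' := need - 1
      if need' = 0 then true
      else pvALoop s k rest (PySem.Set.add got temp) need'

def hasAllCodes (s : String) (k : Int) : Bool :=
  -- need = 1 << k; under Pre_ (0 ≤ k) this is 2 ^ k.toNat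
  pvALoop s.toList k (PySem.List.pyRange k (PySem.List.len s.toList + 1) 1)
    PySem.Set.empty ((2 : Int) ^ k.toNat)

-- ===== PORT B =====
-- the for-loop of B: state (distinct, prev); 'if w != prev: distinct += 1; prev = w'
def pvRunLoop : List (List Char) → Option (List Char) → Int → Int
  | [], _, distinct => distinct
  | w :: rest, prev, distinct =>
    if some w ≠ prev then pvRunLoop rest (some w) (distinct + 1)
    else pvRunLoop rest prev distinct

def hasAllCodes_alt (s : String) (k : Int) : Bool :=
  let windows :=
    @PySem.List.sorted (List Char) (List Char) List.instLinearOrder.toLT LinearOrder.toDecidableLT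
      ((PySem.List.pyRange 0 (PySem.List.len s.toList - k + 1) 1).map
        (fun i => PySem.List.slice s.toList (some i) (some (i + k))))
      (fun x => x) false
  decide ((2 : Int) ^ k.toNat ≤ pvRunLoop windows none 0)   -- distinct >= 1 << k

-- ===== PRECONDITION & SPEC =====
-- Pre_ excludes k < 0, on which A's '1 << k' raises ValueError (B raises there too).
def Pre_hasAllCodes (s : String) (k : Int) : Prop := 0 ≤ k
instance (s : String) (k : Int) : Decidable (Pre_hasAllCodes s k) := by unfold Pre_hasAllCodes; infer_instance
def pvWitness_hasAllCodes : String × Int := ("0110", 1)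

def Spec_hasAllCodes (s : String) (k : Int) (out : Bool) : Prop := out = hasAllCodes_alt s k
instance (s : String) (k : Int) (out : Bool) : Decidable (Spec_hasAllCodes s k out) := by unfold Spec_hasAllCodes; infer_instance

-- ===== CLAIM (what is proved, stated in full; the proofs are below) =====
def Claim_equal_hasAllCodes : Prop := ∀ (s : String) (k : Int), Dom_hasAllCodes s k → Pre_hasAllCodes s k → Spec_hasAllCodes s k (hasAllCodes s k)

-- ===== LEMMAS AND PROOFS =====

-- folding Set.add never shrinks the set
theorem pv_foldl_add_len_mono (f : Int → List Char) :
    ∀ (l : List Int) (c : PySem.Set (List Char)),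
      c.length ≤ (l.foldl (fun c i => PySem.Set.add c (f i)) c).length := by
  intro l
  induction l with
  | nil => intro c; simp
  | cons i rest ih =>
    intro c
    refine le_trans ?_ (ih (PySem.Set.add c (f i)))
    rw [PySem.Set.add_eq_ite]
    split <;> simp

-- A's counter loop computes "final set size reached 2^m"
theorem pv_aLoop_eq (s : List Char) (k : Int) (m : Nat) :
    ∀ (l : List Int) (got : PySem.Set (List Char)) (need : Int),
      need + (got.length : Int) = (2 : Int) ^ m → 1 ≤ need →
      pvALoop s k l got need =
        decide ((2 : Int) ^ m ≤
          (((l.foldl (fun c i => PySem.Set.add c (PySem.List.slice s (some (i - k)) (some i))) got).length : Nat) : Int)) := by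
  intro l
  induction l with
  | nil =>
    intro got need hinv hge
    simp [pvALoop]
    omega
  | cons i rest ih =>
    intro got need hinv hge
    simp only [pvALoop, List.foldl_cons]
    by_cases hmem : PySem.List.slice s (some (i - k)) (some i) ∈ got
    · rw [if_pos (by simpa [PySem.Set.contains_iff] using hmem)]
      simp only [PySem.Set.add_of_mem hmem]
      exact ih got need hinv hge
    · rw [if_neg (by simpa [PySem.Set.contains_iff] using hmem)]
      have hlen : ((PySem.Set.add got (PySem.List.slice s (some (i - k)) (some i))).length : Int)
          = (got.length : Int) + 1 := by
        rw [PySem.Set.add_of_not_mem hmem]; simp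
      by_cases hz : need - 1 = 0
      · rw [if_pos hz]
        have := pv_foldl_add_len_mono (fun i => PySem.List.slice s (some (i - k)) (some i)) rest
          (PySem.Set.add got (PySem.List.slice s (some (i - k)) (some i)))
        symm
        rw [decide_eq_true_iff]
        omega
      · rw [if_neg hz]
        exact ih _ (need - 1) (by omega) (by omega)

-- the set built by folding Set.add over a list of windows is set(windows)
theorem pv_foldl_add_eq_ofList (f : Int → List Char) (l : List Int) :
    l.foldl (fun c i => PySem.Set.add c (f i)) PySem.Set.empty = PySem.Set.ofList (l.map f) := by
  rw [← PySem.Set.update_map_eq_foldl_add, PySem.Set.update_empty]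

-- set(xs) has one element per distinct element of xs
theorem pv_len_ofList (xs : List (List Char)) :
    (PySem.Set.ofList xs).length = xs.toFinset.card := by
  have hnd := PySem.Set.nodup_ofList xs
  have : (PySem.Set.ofList xs).toFinset = xs.toFinset := by
    ext a; simp [PySem.Set.mem_ofList]
  rw [← this, List.toFinset_card_of_nodup hnd]

-- the run-counting scan on a sorted list, with a minimal previous element
theorem pv_runLoop_some (l : List (List Char)) (hp : l.Pairwise (· ≤ ·)) :
    ∀ (p : List Char), (∀ x ∈ l, p ≤ x) → ∀ (d : Int),
      pvRunLoop l (some p) d = d + ((l.toFinset.erase p).card : Int) := by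
  induction l with
  | nil => intro p _ d; simp [pvRunLoop]
  | cons w rest ih =>
    intro p hmin d
    have hw : ∀ x ∈ rest, w ≤ x := (List.pairwise_cons.mp hp).1
    have hrest := (List.pairwise_cons.mp hp).2
    by_cases hwp : w = p
    · subst hwp
      rw [pvRunLoop, if_neg (by simp)]
      rw [ih hrest w hw d]
      congr 2
      simp
    · rw [pvRunLoop, if_pos (by simpa using hwp)]
      rw [ih hrest w hw (d + 1)]
      have hpw : p < w := lt_of_le_of_ne (hmin w (by simp)) (Ne.symm hwp)
      have hpn : p ∉ (w :: rest).toFinset := by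
        simp only [List.toFinset_cons, Finset.mem_insert, List.mem_toFinset]
        rintro (h | h)
        · exact hwp h.symm
        · exact absurd (hw p h) (not_le.mpr hpw)
      rw [Finset.erase_eq_of_notMem hpn]
      have : (w :: rest).toFinset = insert w rest.toFinset := by simp
      rw [this]
      by_cases hwr : w ∈ rest.toFinset
      · have h1 : insert w rest.toFinset = rest.toFinset := Finset.insert_eq_self.mpr hwr
        have h2 : (rest.toFinset.erase w).card = rest.toFinset.card - 1 :=
          Finset.card_erase_of_mem hwr
        have h3 : 1 ≤ rest.toFinset.card := Finset.card_pos.mpr ⟨w, hwr⟩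
        rw [h1, h2]
        omega
      · rw [Finset.card_insert_of_notMem hwr, Finset.erase_eq_of_notMem hwr]
        push_cast
        omega

-- the full scan counts the distinct elements of a sorted list
theorem pv_runLoop_none (l : List (List Char)) (hp : l.Pairwise (· ≤ ·)) :
    pvRunLoop l none 0 = (l.toFinset.card : Int) := by
  cases l with
  | nil => simp [pvRunLoop]
  | cons w rest =>
    have hw : ∀ x ∈ rest, w ≤ x := (List.pairwise_cons.mp hp).1
    have hrest := (List.pairwise_cons.mp hp).2
    rw [pvRunLoop, if_pos (by simp)]
    rw [pv_runLoop_some rest hrest w hw (0 + 1)]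
    have : (w :: rest).toFinset = insert w rest.toFinset := by simp
    rw [this]
    by_cases hwr : w ∈ rest.toFinset
    · rw [Finset.insert_eq_self.mpr hwr]
      have h2 : (rest.toFinset.erase w).card = rest.toFinset.card - 1 :=
        Finset.card_erase_of_mem hwr
      have h3 : 1 ≤ rest.toFinset.card := Finset.card_pos.mpr ⟨w, hwr⟩
      rw [h2]; push_cast; omega
    · rw [Finset.card_insert_of_notMem hwr, Finset.erase_eq_of_notMem hwr]
      push_cast; omega

-- A's window list (right endpoints k..n) IS B's window list (left endpoints 0..n-k)
theorem pv_windows_eq (s : List Char) (k : Int) :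
    (PySem.List.pyRange k (PySem.List.len s + 1) 1).map
        (fun i => PySem.List.slice s (some (i - k)) (some i)) =
    (PySem.List.pyRange 0 (PySem.List.len s - k + 1) 1).map
        (fun i => PySem.List.slice s (some i) (some (i + k))) := by
  rw [PySem.List.pyRange_one, PySem.List.pyRange_one]
  rw [List.map_map, List.map_map]
  have hn : (PySem.List.len s + 1 - k).toNat = (PySem.List.len s - k + 1 - 0).toNat := by omega
  rw [hn]
  apply List.map_congr_left
  intro j _
  simp only [Function.comp]
  have h1 : k + (j : Int) - k = 0 + (j : Int) := by ring
  have h2 : k + (j : Int) = 0 + (j : Int) + k := by ring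
  rw [h1, h2]

-- ===== VERDICT (by name: the statement is the Claim_ definition above) =====
theorem hasAllCodes_spec : Claim_equal_hasAllCodes := by
  intro s k _ hk
  unfold Spec_hasAllCodes hasAllCodes hasAllCodes_alt
  rw [pv_aLoop_eq s.toList k k.toNat _ PySem.Set.empty ((2 : Int) ^ k.toNat)
    (by simp [PySem.Set.empty]) (by exact one_le_pow₀ one_le_two)]
  rw [pv_foldl_add_eq_ofList, pv_windows_eq, pv_len_ofList]
  set ws := (PySem.List.pyRange 0 (PySem.List.len s.toList - k + 1) 1).map
      (fun i => PySem.List.slice s.toList (some i) (some (i + k))) with hws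
  set sws := @PySem.List.sorted (List Char) (List Char) List.instLinearOrder.toLT
      LinearOrder.toDecidableLT ws (fun x => x) false with hsws
  show decide ((2:Int) ^ k.toNat ≤ (ws.toFinset.card : Int)) =
      decide ((2:Int) ^ k.toNat ≤ pvRunLoop sws none 0)
  rw [pv_runLoop_none sws (by rw [hsws]; exact PySem.List.sorted_pairwise ws (fun x => x))]
  have hfs : sws.toFinset = ws.toFinset := by
    ext a; rw [hsws]; simp [PySem.List.mem_sorted]
  rw [hfs]
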